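-- pv_equiv track=rewrite | github.com/CL2001/Personal-Projects | FileExplorerPong.py | trajectoire2g
-- ===== SOURCE A (Python) =====
-- def trajectoire2g(current_pos, trajectoire):
--     while current_pos not in (0, 15, 30, 45, 60, 75, 90, 105, 120, 135):
--         if len(trajectoire) % 2 == 0:
--             current_pos -= 1
--         else:
--             current_pos -= 16
--         trajectoire.append(current_pos)
--         if 0 <= current_pos <= 14:
--             current_pos, nouv_trajectoire = trajectoire4g(current_pos, trajectoire)
--             trajectoire + nouv_trajectoire
--     return current_pos, trajectoire
--
-- def trajectoire4g(current_pos, trajectoire):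
--     while current_pos not in (0, 15, 30, 45, 60, 75, 90, 105, 120, 135):
--         if len(trajectoire) % 2 == 0:
--             current_pos -= 1
--         else:
--             current_pos += 14
--         trajectoire.append(current_pos)
--         if 135 <= current_pos <= 149:
--             current_pos, nouv_trajectoire = trajectoire2g(current_pos, trajectoire)
--             trajectoire + nouv_trajectoire
--     return current_pos, trajectoire
-- ===== SOURCE B (Python) =====
-- def trajectoire2g(current_pos, trajectoire):
--     # Flat state machine replacing A's mutual recursion; mutates trajectoire in place like A.
--     terminals = (0, 15, 30, 45, 60, 75, 90, 105, 120, 135)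
--     mode = '2g'
--     while current_pos not in terminals:
--         if len(trajectoire) % 2 == 0:
--             current_pos -= 1
--         elif mode == '2g':
--             current_pos -= 16
--         else:
--             current_pos += 14
--         trajectoire.append(current_pos)
--         if mode == '2g' and 0 <= current_pos <= 14:
--             mode = '4g'
--         elif mode == '4g' and 135 <= current_pos <= 149:
--             mode = '2g'
--     return current_pos, trajectoire
-- ===== Notes on version B (the rewrite author's own statement) =====
-- stated objective: simpler
-- what changed: Replaces the pair of mutually recursive while-loop functions with a single flat loop carrying an explicit mode flag that toggles on the two bounce bands.
import Mathlib
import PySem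

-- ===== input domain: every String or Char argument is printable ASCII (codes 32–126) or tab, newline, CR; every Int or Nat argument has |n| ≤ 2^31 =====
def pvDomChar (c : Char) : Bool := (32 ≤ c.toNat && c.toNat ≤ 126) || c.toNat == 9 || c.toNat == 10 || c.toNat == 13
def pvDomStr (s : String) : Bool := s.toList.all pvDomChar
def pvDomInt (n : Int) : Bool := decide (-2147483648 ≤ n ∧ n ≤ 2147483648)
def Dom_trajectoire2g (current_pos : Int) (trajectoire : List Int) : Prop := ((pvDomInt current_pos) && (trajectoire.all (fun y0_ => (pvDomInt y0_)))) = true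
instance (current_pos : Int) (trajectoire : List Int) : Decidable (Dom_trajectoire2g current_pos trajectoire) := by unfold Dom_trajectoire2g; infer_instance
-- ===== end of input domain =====

-- ===== PORT A =====
-- B replaces A's two mutually recursive loop functions by one flat loop with a mode flag
-- (objective: simpler; no speed claim). Both Pythons mutate `trajectoire` in place by the
-- same appends; the theorems are about the returned value. Fuel is a totality guard only
-- (the ports are proved equal at every fuel; Python A and B loop forever on the same inputs).
def pyTerm (cp : Int) : Bool := ([0, 15, 30, 45, 60, 75, 90, 105, 120, 135] : List Int).contains cp

mutual
def go2g : Nat → Int → List Int → Nat × Int × List Int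
  | 0, cp, tr => (0, cp, tr)
  | n+1, cp, tr =>
    if pyTerm cp then (n+1, cp, tr)
    else
      let cp' := if tr.length % 2 == 0 then cp - 1 else cp - 16
      let tr' := tr ++ [cp']
      if 0 ≤ cp' ∧ cp' ≤ 14 then
        let r := go4g n cp' tr'
        go2g (min r.1 n) r.2.1 r.2.2
      else go2g n cp' tr'
  termination_by n _ _ => n
  decreasing_by
    · exact Nat.lt_succ_self n
    · exact Nat.lt_succ_of_le (Nat.min_le_right _ n)
    · exact Nat.lt_succ_self n
def go4g : Nat → Int → List Int → Nat × Int × List Int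
  | 0, cp, tr => (0, cp, tr)
  | n+1, cp, tr =>
    if pyTerm cp then (n+1, cp, tr)
    else
      let cp' := if tr.length % 2 == 0 then cp - 1 else cp + 14
      let tr' := tr ++ [cp']
      if 135 ≤ cp' ∧ cp' ≤ 149 then
        let r := go2g n cp' tr'
        go4g (min r.1 n) r.2.1 r.2.2
      else go4g n cp' tr'
  termination_by n _ _ => n
  decreasing_by
    · exact Nat.lt_succ_self n
    · exact Nat.lt_succ_of_le (Nat.min_le_right _ n)
    · exact Nat.lt_succ_self n
end

def trajectoire2g (current_pos : Int) (trajectoire : List Int) : Int × List Int :=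
  (go2g (current_pos.natAbs + 1000) current_pos trajectoire).2

-- ===== PORT B =====
def goFlat : Nat → Bool → Int → List Int → Int × List Int
  | 0, _, cp, tr => (cp, tr)
  | n+1, mode2g, cp, tr =>
    if pyTerm cp then (cp, tr)
    else
      let cp' := if tr.length % 2 == 0 then cp - 1
                 else if mode2g then cp - 16 else cp + 14
      let tr' := tr ++ [cp']
      let mode' := if mode2g && decide (0 ≤ cp' ∧ cp' ≤ 14) then false
                   else if !mode2g && decide (135 ≤ cp' ∧ cp' ≤ 149) then true
                   else mode2g
      goFlat n mode' cp' tr'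

def trajectoire2g_alt (current_pos : Int) (trajectoire : List Int) : Int × List Int :=
  goFlat (current_pos.natAbs + 1000) true current_pos trajectoire

-- ===== PRECONDITION & SPEC =====
-- (no Pre_: the ports agree on every input, for every fuel value)
def Spec_trajectoire2g (current_pos : Int) (trajectoire : List Int) (out : Int × List Int) : Prop := out = trajectoire2g_alt current_pos trajectoire
instance (current_pos : Int) (trajectoire : List Int) (out : Int × List Int) : Decidable (Spec_trajectoire2g current_pos trajectoire out) := by unfold Spec_trajectoire2g; infer_instance

-- ===== CLAIM (what is proved, stated in full; the proofs are below) =====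
def Claim_equal_trajectoire2g : Prop := ∀ (current_pos : Int) (trajectoire : List Int), Dom_trajectoire2g current_pos trajectoire → Spec_trajectoire2g current_pos trajectoire (trajectoire2g current_pos trajectoire)

-- ===== LEMMAS AND PROOFS =====
theorem go2g_of_term (k : Nat) (cp : Int) (tr : List Int) (h : pyTerm cp = true) :
    go2g (k+1) cp tr = (k+1, cp, tr) := by simp [go2g, h]

theorem go4g_of_term (k : Nat) (cp : Int) (tr : List Int) (h : pyTerm cp = true) :
    go4g (k+1) cp tr = (k+1, cp, tr) := by simp [go4g, h]

-- The two fuel machines agree for EVERY fuel value (in particular at the fuel the wrappers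
-- use); we also carry two invariants: the leftover fuel is at most the given fuel, and if it
-- is positive the final position is terminal (so an outer loop's re-check exits immediately).
theorem go_agree : ∀ (n : Nat) (cp : Int) (tr : List Int),
    ((go2g n cp tr).1 ≤ n ∧ ((go2g n cp tr).1 ≠ 0 → pyTerm (go2g n cp tr).2.1 = true) ∧
      goFlat n true cp tr = (go2g n cp tr).2)
  ∧ ((go4g n cp tr).1 ≤ n ∧ ((go4g n cp tr).1 ≠ 0 → pyTerm (go4g n cp tr).2.1 = true) ∧
      goFlat n false cp tr = (go4g n cp tr).2) := by
  intro n
  induction n with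
  | zero => intro cp tr; simp [go2g, go4g, goFlat]
  | succ n ih =>
    intro cp tr
    constructor
    · by_cases hT : pyTerm cp = true
      · simp [go2g, goFlat, hT]
      · have hT' : pyTerm cp = false := by simpa using hT
        rw [go2g, goFlat]
        simp only [hT', Bool.false_eq_true, if_false, if_true, Bool.true_and, Bool.not_true,
          Bool.false_and, decide_eq_true_eq]
        set cp' := if tr.length % 2 == 0 then cp - 1 else cp - 16 with hcp'
        set tr' := tr ++ [cp'] with htr'
        by_cases hb : 0 ≤ cp' ∧ cp' ≤ 14
        · obtain ⟨h4le, h4term, h4eq⟩ := (ih cp' tr').2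
          rw [if_pos hb, if_pos hb]
          cases hm : (go4g n cp' tr').1 with
          | zero =>
            simp only [Nat.zero_min, go2g]
            exact ⟨by omega, by simp, by rw [h4eq]⟩
          | succ k =>
            have hterm : pyTerm (go4g n cp' tr').2.1 = true := by
              apply h4term; omega
            have hk : k + 1 ≤ n := by omega
            have hmin : min (k + 1) n = k + 1 := by omega
            rw [hmin, go2g_of_term _ _ _ hterm]
            exact ⟨by omega, fun _ => hterm, by rw [h4eq]⟩
        · obtain ⟨hle, hterm, heq⟩ := (ih cp' tr').1
          rw [if_neg hb, if_neg hb]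
          exact ⟨by omega, hterm, heq⟩
    · by_cases hT : pyTerm cp = true
      · simp [go4g, goFlat, hT]
      · have hT' : pyTerm cp = false := by simpa using hT
        rw [go4g, goFlat]
        simp only [hT', Bool.false_eq_true, if_false, Bool.false_and, Bool.not_false,
          Bool.true_and, decide_eq_true_eq]
        set cp' := if tr.length % 2 == 0 then cp - 1 else cp + 14 with hcp'
        set tr' := tr ++ [cp'] with htr'
        by_cases hb : 135 ≤ cp' ∧ cp' ≤ 149
        · obtain ⟨h2le, h2term, h2eq⟩ := (ih cp' tr').1
          rw [if_pos hb, if_pos hb]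
          cases hm : (go2g n cp' tr').1 with
          | zero =>
            simp only [Nat.zero_min, go4g]
            exact ⟨by omega, by simp, by rw [h2eq]⟩
          | succ k =>
            have hterm : pyTerm (go2g n cp' tr').2.1 = true := by
              apply h2term; omega
            have hk : k + 1 ≤ n := by omega
            have hmin : min (k + 1) n = k + 1 := by omega
            rw [hmin, go4g_of_term _ _ _ hterm]
            exact ⟨by omega, fun _ => hterm, by rw [h2eq]⟩
        · obtain ⟨hle, hterm, heq⟩ := (ih cp' tr').2
          rw [if_neg hb, if_neg hb]
          exact ⟨by omega, hterm, heq⟩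

-- ===== VERDICT (by name: the statement is the Claim_ definition above) =====
theorem trajectoire2g_spec : Claim_equal_trajectoire2g := by
  intro cp tr _
  unfold Spec_trajectoire2g trajectoire2g trajectoire2g_alt
  exact ((go_agree (cp.natAbs + 1000) cp tr).1.2.2).symm
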